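-- pv_equiv track=rewrite | github.com/AlGhozaliRamadhan/SCrack | module/workers.py | _reconstruct_password
-- ===== SOURCE A (Python) =====
-- def _reconstruct_password(prefix: str, charset: str,
--                           suffix_length: int, candidate_index: int) -> str:
--     """Rebuild the plaintext from its numeric index in the search space."""
--     suffix = []
--     temp = candidate_index
--     charset_len = len(charset)
--     for _ in range(suffix_length):
--         suffix.append(charset[temp % charset_len])
--         temp //= charset_len
--     return prefix + ''.join(reversed(suffix))
-- ===== SOURCE B (Python) =====
-- def _reconstruct_password(prefix: str, charset: str,
--                           suffix_length: int, candidate_index: int) -> str: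
--     """Rebuild the plaintext by divide-and-conquer radix conversion:
--     split the index with one divmod at half the length, high digits first."""
--     charset_len = len(charset)
--
--     def build(t: int, length: int) -> str:
--         if length <= 0:
--             return ''
--         if length == 1:
--             return charset[t % charset_len]
--         half = length // 2
--         high, low = divmod(t, charset_len ** half)
--         return build(high, length - half) + build(low, half)
--
--     return prefix + build(candidate_index, suffix_length)
-- ===== Notes on version B (the rewrite author's own statement) =====
-- stated objective: alternative
-- what changed: B converts the index to the base-charset suffix by divide-and-conquer: one divmod by charset_len**(length//2) splits the index into high and low halves which are converted recursively and concatenated most-significant-first, instead of A's least-significant-first digit loop followed by a reversal.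
import Mathlib
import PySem

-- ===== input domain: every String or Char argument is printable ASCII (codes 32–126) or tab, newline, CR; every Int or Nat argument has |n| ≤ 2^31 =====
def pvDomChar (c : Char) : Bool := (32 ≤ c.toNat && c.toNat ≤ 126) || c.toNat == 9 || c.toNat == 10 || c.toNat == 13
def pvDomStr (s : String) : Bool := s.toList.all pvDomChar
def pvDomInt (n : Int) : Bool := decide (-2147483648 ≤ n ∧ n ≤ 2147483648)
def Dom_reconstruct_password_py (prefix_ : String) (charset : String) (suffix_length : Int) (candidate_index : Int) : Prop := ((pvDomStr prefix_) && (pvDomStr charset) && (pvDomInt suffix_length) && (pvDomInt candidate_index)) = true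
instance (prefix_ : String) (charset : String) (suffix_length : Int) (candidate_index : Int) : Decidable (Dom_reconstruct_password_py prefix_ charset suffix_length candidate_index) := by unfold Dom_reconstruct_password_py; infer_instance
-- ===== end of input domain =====

-- B rebuilds the suffix by divide-and-conquer radix conversion (split the index with one divmod at
-- half the length, high digits first) instead of A's LSB-first digit loop plus reversal; objective: alternative.

-- ===== PORT A =====
-- the loop `for _ in range(suffix_length): suffix.append(charset[temp % n]); temp //= n`
-- as structural recursion on the (nonnegative) iteration count, same state (suffix, temp);
-- `charset[i]` is PySem.List.pyGet? (in range whenever the Python does not raise; Pre_ excludes the raise)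
def pvALoop (cs : List Char) (n : Int) : Nat → (List Char × Int) → (List Char × Int)
  | 0, st => st
  | k+1, st =>
      pvALoop cs n k
        (st.1 ++ [(PySem.List.pyGet? cs (PySem.Int.mod st.2 n)).getD ' '],
         PySem.Int.floordiv st.2 n)

def reconstruct_password_py (prefix_ : String) (charset : String) (suffix_length : Int) (candidate_index : Int) : String :=
  let cs := charset.toList
  let charset_len : Int := (cs.length : Int)
  let st := pvALoop cs charset_len suffix_length.toNat ([], candidate_index)
  prefix_ ++ String.ofList st.1.reverse

-- ===== PORT B =====
-- Source B's recursive `build(t, length)`: base cases as written; otherwise `high, low = divmod(t, n ** (length//2))`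
-- (one floordiv + one mod) and recurse on the two halves, high digits first
-- structural recursion on a fuel counter (length.toNat at the top call, enough for every
-- recursive call since both halves are shorter); the body is Source B's `build` verbatim
def pvBuild (cs : List Char) (n : Int) : Nat → Int → Int → String
  | 0, _, _ => ""
  | fuel+1, t, length =>
    if length ≤ 0 then ""
    else if length = 1 then String.ofList [(PySem.List.pyGet? cs (PySem.Int.mod t n)).getD ' ']
    else
      pvBuild cs n fuel (PySem.Int.floordiv t (n ^ (PySem.Int.floordiv length 2).toNat))
        (length - PySem.Int.floordiv length 2) ++
      pvBuild cs n fuel (PySem.Int.mod t (n ^ (PySem.Int.floordiv length 2).toNat))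
        (PySem.Int.floordiv length 2)

def reconstruct_password_py_alt (prefix_ : String) (charset : String) (suffix_length : Int) (candidate_index : Int) : String :=
  let cs := charset.toList
  let charset_len : Int := (cs.length : Int)
  prefix_ ++ pvBuild cs charset_len suffix_length.toNat candidate_index suffix_length

-- ===== PRECONDITION & SPEC =====
-- Pre_ excludes only the inputs on which A raises ZeroDivisionError: empty charset with a positive suffix_length
def Pre_reconstruct_password_py (prefix_ : String) (charset : String) (suffix_length : Int) (candidate_index : Int) : Prop :=
  suffix_length ≤ 0 ∨ charset ≠ ""
instance (prefix_ : String) (charset : String) (suffix_length : Int) (candidate_index : Int) : Decidable (Pre_reconstruct_password_py prefix_ charset suffix_length candidate_index) := by unfold Pre_reconstruct_password_py; infer_instance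

def pvWitness_reconstruct_password_py : String × String × Int × Int := ("pw_", "abc", 3, 17)

def Spec_reconstruct_password_py (prefix_ : String) (charset : String) (suffix_length : Int) (candidate_index : Int) (out : String) : Prop := out = reconstruct_password_py_alt prefix_ charset suffix_length candidate_index
instance (prefix_ : String) (charset : String) (suffix_length : Int) (candidate_index : Int) (out : String) : Decidable (Spec_reconstruct_password_py prefix_ charset suffix_length candidate_index out) := by unfold Spec_reconstruct_password_py; infer_instance

-- ===== CLAIM (what is proved, stated in full; the proofs are below) =====
def Claim_equal_reconstruct_password_py : Prop := ∀ (prefix_ : String) (charset : String) (suffix_length : Int) (candidate_index : Int), Dom_reconstruct_password_py prefix_ charset suffix_length candidate_index → Pre_reconstruct_password_py prefix_ charset suffix_length candidate_index → Spec_reconstruct_password_py prefix_ charset suffix_length candidate_index (reconstruct_password_py prefix_ charset suffix_length candidate_index)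

-- ===== LEMMAS AND PROOFS =====

-- digits produced by A's loop, accumulator-free (least significant first)
def pvADig (cs : List Char) (n : Int) : Nat → Int → List Char
  | 0, _ => []
  | k+1, t => (PySem.List.pyGet? cs (PySem.Int.mod t n)).getD ' ' :: pvADig cs n k (PySem.Int.floordiv t n)

theorem pvALoop_fst (cs : List Char) (n : Int) (k : Nat) :
    ∀ acc t, (pvALoop cs n k (acc, t)).1 = acc ++ pvADig cs n k t := by
  induction k with
  | zero => intro acc t; simp [pvALoop, pvADig]
  | succ k ih =>
      intro acc t
      simp only [pvALoop, pvADig]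
      rw [ih]
      simp

theorem pv_emod_mul_ediv (a b t : Int) (ha : 0 < a) : t % (a*b) / a = t / a % b := by
  have h1 : t % (a*b) = t + (-(t/(a*b)*b))*a := by
    rw [Int.emod_def]; ring
  rw [h1, Int.add_mul_ediv_right _ _ (by omega : a ≠ 0),
      ← Int.ediv_ediv_of_nonneg (le_of_lt ha), Int.emod_def]
  ring

theorem pvADig_map (cs : List Char) (n : Int) (hn : 0 < n) (k : Nat) :
    ∀ t, pvADig cs n k t = (List.range k).map
      (fun i => (PySem.List.pyGet? cs ((t / n ^ i) % n)).getD ' ') := by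
  induction k with
  | zero => intro t; simp [pvADig]
  | succ k ih =>
      intro t
      rw [pvADig, PySem.Int.mod_eq_emod_of_pos hn, PySem.Int.floordiv_eq_ediv_of_pos hn, ih,
        List.range_succ_eq_map, List.map_cons, List.map_map]
      congr 1
      · simp
      · apply List.map_congr_left
        intro i _
        have hc : t / n / n ^ i = t / n ^ (i+1) := by
          rw [Int.ediv_ediv_of_nonneg (le_of_lt hn), ← pow_succ']
        simp [Function.comp, hc]

-- characterization of B's divide-and-conquer builder: the digits of t, most significant first
theorem pvBuild_map (cs : List Char) (n : Int) (hn : 0 < n) (fuel : Nat) :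
    ∀ (len t : Int), len.toNat ≤ fuel →
    pvBuild cs n fuel t len = String.ofList (((List.range len.toNat).reverse).map
      (fun i => (PySem.List.pyGet? cs ((t / n ^ i) % n)).getD ' ')) := by
  induction fuel with
  | zero =>
      intro len t hle
      have h0 : len.toNat = 0 := by omega
      simp [pvBuild, h0]
  | succ fuel ih =>
   intro len t hle
   rw [pvBuild]
   by_cases h0 : len ≤ 0
   · simp [h0, Int.toNat_of_nonpos h0]
   · by_cases h1 : len = 1
     · subst h1
       simp [PySem.Int.mod_eq_emod_of_pos hn, List.range_succ]
     · simp only [h0, h1, if_false]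
       have h2 : (2:Int) ≤ len := by omega
       have hfd : PySem.Int.floordiv len 2 = len / 2 :=
         PySem.Int.floordiv_eq_ediv_of_pos (by norm_num)
       have ihh := ih (len - PySem.Int.floordiv len 2)
         (PySem.Int.floordiv t (n ^ (PySem.Int.floordiv len 2).toNat)) (by rw [hfd]; omega)
       have ihl := ih (PySem.Int.floordiv len 2)
         (PySem.Int.mod t (n ^ (PySem.Int.floordiv len 2).toNat)) (by rw [hfd]; omega)
       rw [ihh, ihl]
       set h : Nat := (PySem.Int.floordiv len 2).toNat with hh
       have hpow : (0:Int) < n ^ h := pow_pos hn h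
       have hhle : h ≤ len.toNat := by rw [hh, hfd]; omega
       have hsub : (len - PySem.Int.floordiv len 2).toNat = len.toNat - h := by
         rw [hh, hfd]; omega
       rw [PySem.Int.floordiv_eq_ediv_of_pos hpow, PySem.Int.mod_eq_emod_of_pos hpow, hsub]
       rw [← String.ofList_append]
       congr 1
       have hsplit : List.range len.toNat = List.range h ++ (List.range (len.toNat - h)).map (h + ·) := by
         rw [← List.range_add, Nat.add_sub_cancel' hhle]
       rw [hsplit, List.reverse_append, List.map_append]
       congr 1
       · simp only [List.map_reverse, List.map_map]
         congr 1
         apply List.map_congr_left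
         intro i _
         have hc : t / n ^ h / n ^ i = t / n ^ (h + i) := by
           rw [Int.ediv_ediv_of_nonneg (le_of_lt hpow), ← pow_add]
         simp [Function.comp, hc]
       · apply List.map_congr_left
         intro i hi
         have hih : i < h := by
           rw [List.mem_reverse, List.mem_range] at hi; exact hi
         have hd : t % n ^ h / n ^ i = t / n ^ i % n ^ (h - i) := by
           have : n ^ h = n ^ i * n ^ (h - i) := by
             rw [← pow_add, Nat.add_sub_cancel' (le_of_lt hih)]
           rw [this, pv_emod_mul_ediv _ _ _ (pow_pos hn i)]
         rw [hd, Int.emod_emod_of_dvd _ (dvd_pow_self n (by omega : h - i ≠ 0))]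

-- ===== VERDICT (by name: the statement is the Claim_ definition above) =====
theorem reconstruct_password_py_spec : Claim_equal_reconstruct_password_py := by
  intro prefix_ charset suffix_length candidate_index _ hpre
  unfold Spec_reconstruct_password_py reconstruct_password_py reconstruct_password_py_alt
  by_cases hL : suffix_length ≤ 0
  · have h0 : suffix_length.toNat = 0 := Int.toNat_of_nonpos hL
    simp [h0, pvALoop, pvBuild]
  · have hcs : charset ≠ "" := by
      rcases hpre with h | h
      · exact absurd h hL
      · exact h
    have hne : charset.toList ≠ [] := by
      intro hl
      exact hcs (String.toList_inj.mp (by simpa using hl))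
    have hn : 0 < ((charset.toList.length : Int)) := by
      have := List.length_pos_of_ne_nil hne
      omega
    simp only
    congr 1
    rw [pvALoop_fst, pvBuild_map _ _ hn _ _ _ (le_refl _), pvADig_map _ _ hn]
    simp only [List.nil_append]
    rw [← List.map_reverse]
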